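-- pv_equiv track=rewrite | github.com/wardmike/LeetCode | 1. Medium/890. Find and Replace Pattern/find_and_replace_pattern.py | findWordCode
-- ===== SOURCE A (Python) =====
-- def findWordCode(word):
--     """
--     :type word: str
--     :rtype: List[str]
--     """
--     letter_map = {}
--     next_code = 0
--
--     code = []
--     for letter in word:
--         if letter in letter_map:
--             code.append(letter_map[letter])
--         else:
--             letter_map[letter] = next_code
--             code.append(next_code)
--             next_code += 1
--     return code
-- ===== SOURCE B (Python) =====
-- def findWordCode(word):
--     seen = set()
--     distinct = []
--     for letter in word:
--         if letter not in seen: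
--             seen.add(letter)
--             distinct.append(letter)
--     return [distinct.index(letter) for letter in word]
-- ===== Notes on version B (the rewrite author's own statement) =====
-- stated objective: alternative
-- what changed: Replaces the single fused loop maintaining a running next_code counter and a letter->code dict with two separate passes: first build the ordered list of distinct letters, then map each letter to its position in that list via list.index.
import Mathlib
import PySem

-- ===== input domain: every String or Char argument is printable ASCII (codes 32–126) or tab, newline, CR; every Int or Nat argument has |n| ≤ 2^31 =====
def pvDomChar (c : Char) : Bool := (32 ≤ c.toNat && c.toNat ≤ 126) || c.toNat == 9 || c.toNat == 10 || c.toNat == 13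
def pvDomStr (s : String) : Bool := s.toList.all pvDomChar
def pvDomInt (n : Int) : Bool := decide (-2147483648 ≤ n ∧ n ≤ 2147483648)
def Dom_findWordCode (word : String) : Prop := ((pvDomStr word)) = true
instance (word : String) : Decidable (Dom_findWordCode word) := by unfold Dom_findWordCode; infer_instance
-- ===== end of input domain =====

-- B replaces A's fused counter+dict loop with two passes: build the ordered distinct-letter list, then code each letter by its position in it (alternative decomposition, same values).


-- ===== PORT A =====
-- loop body of A: (letter_map, next_code, code); letter_map[letter] is guarded by the
-- membership test, so getD 0 is exact here
def aStep (st : PySem.Dict Char Int × Int × List Int) (letter : Char) :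
    PySem.Dict Char Int × Int × List Int :=
  if st.1.contains letter then
    (st.1, st.2.1, st.2.2 ++ [st.1.getD letter 0])
  else
    (st.1.insert letter st.2.1, st.2.1 + 1, st.2.2 ++ [st.2.1])

def findWordCode (word : String) : List Int :=
  (word.toList.foldl aStep (PySem.Dict.empty, 0, [])).2.2

-- ===== PORT B =====
-- first pass of B: (seen, distinct)
def bStep (st : PySem.Set Char × List Char) (letter : Char) : PySem.Set Char × List Char :=
  if PySem.Set.contains st.1 letter then st
  else (PySem.Set.add st.1 letter, st.2 ++ [letter])

def findWordCode_alt (word : String) : List Int :=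
  let st := word.toList.foldl bStep (PySem.Set.empty, [])
  -- distinct.index(letter): letter always occurs, so index? is some; getD 0 is exact
  word.toList.map (fun letter => (((PySem.List.index? st.2 letter).getD 0 : Nat) : Int))

-- ===== PRECONDITION & SPEC =====
def Spec_findWordCode (word : String) (out : List Int) : Prop := out = findWordCode_alt word
instance (word : String) (out : List Int) : Decidable (Spec_findWordCode word out) := by unfold Spec_findWordCode; infer_instance

-- ===== CLAIM (what is proved, stated in full; the proofs are below) =====
def Claim_equal_findWordCode : Prop := ∀ (word : String), Dom_findWordCode word → Spec_findWordCode word (findWordCode word)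

-- ===== LEMMAS AND PROOFS =====

-- B's first pass keeps seen and distinct equal, both = Set.update of the consumed letters
lemma bfold_eq (l : List Char) (s : List Char) :
    l.foldl bStep (s, s) = (PySem.Set.update s l, PySem.Set.update s l) := by
  induction l generalizing s with
  | nil => simp [PySem.Set.update]
  | cons c l ih =>
    show l.foldl bStep (bStep (s, s) c) = _
    rw [PySem.Set.update_cons]
    by_cases hc : c ∈ s
    · have h1 : bStep (s, s) c = (s, s) := by simp [bStep, hc]
      rw [h1, PySem.Set.add_of_mem hc]
      exact ih s
    · have h1 : bStep (s, s) c = (s ++ [c], s ++ [c]) := by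
        simp [bStep, hc]
      rw [h1, PySem.Set.add_of_not_mem hc]
      exact ih (s ++ [c])

-- main invariant: A's loop, started from a dict coding ds by position, appends exactly
-- the positions in the final distinct list
lemma afold_eq (l ds : List Char) (code : List Int) (m : PySem.Dict Char Int)
    (hnd : ds.Nodup)
    (hm : ∀ c, m.get? c = (PySem.List.index? ds c).map (fun n => (n : Int))) :
    (l.foldl aStep (m, (ds.length : Int), code)).2.2
      = code ++ l.map (fun c =>
          (((PySem.List.index? (PySem.Set.update ds l) c).getD 0 : Nat) : Int)) := by
  induction l generalizing ds code m with
  | nil => simp [PySem.Set.update]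
  | cons c l ih =>
    rw [PySem.Set.update_cons]
    by_cases hc : c ∈ ds
    · -- letter already seen: index? hits
      obtain ⟨k, hk⟩ : ∃ k, PySem.List.index? ds c = some k := by
        have := (PySem.List.index?_isSome_iff (xs := ds) (v := c)).2 hc
        exact Option.isSome_iff_exists.1 this
      have hcon : m.contains c = true := by
        rw [PySem.Dict.contains_eq_isSome_get?, hm c, hk]; rfl
      have hget : m.getD c 0 = (k : Int) := by
        rw [PySem.Dict.getD_eq_get?_getD, hm c, hk]; rfl
      have hadd : PySem.Set.add ds c = ds := PySem.Set.add_of_mem hc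
      rw [hadd]
      have hstep : aStep (m, (ds.length : Int), code) c
          = (m, (ds.length : Int), code ++ [(k : Int)]) := by
        simp [aStep, hcon, hget]
      rw [List.foldl_cons, hstep, ih ds _ m hnd hm]
      have hidx : PySem.List.index? (PySem.Set.update ds l) c = some k := by
        rw [PySem.Set.update_eq_append_filter, PySem.List.index?_append_of_mem _ hc, hk]
      simp only [List.map_cons, hidx, Option.getD_some, List.append_assoc,
        List.singleton_append]
    · -- new letter
      have hcon : m.contains c = false := by
        rw [PySem.Dict.contains_eq_isSome_get?, hm c,
            (PySem.List.index?_eq_none_iff (xs := ds) (v := c)).2 hc]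
        rfl
      have hadd : PySem.Set.add ds c = ds ++ [c] := PySem.Set.add_of_not_mem hc
      rw [hadd]
      have hnd' : (ds ++ [c]).Nodup := by
        refine List.Nodup.append hnd (List.nodup_singleton c) ?_
        intro a ha hb
        simp only [List.mem_singleton] at hb
        exact hc (hb ▸ ha)
      have hm' : ∀ x, (m.insert c (ds.length : Int)).get? x
          = (PySem.List.index? (ds ++ [c]) x).map (fun n => (n : Int)) := by
        intro x
        rw [PySem.Dict.get?_insert]
        by_cases hx : x = c
        · subst hx
          rw [PySem.List.index?_append_singleton_self ds x hc]
          simp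
        · rw [if_neg hx, hm x]
          by_cases hxds : x ∈ ds
          · rw [PySem.List.index?_append_of_mem _ hxds]
          · rw [(PySem.List.index?_eq_none_iff (xs := ds) (v := x)).2 hxds,
                (PySem.List.index?_eq_none_iff (xs := ds ++ [c]) (v := x)).2 (by
                  simp [hxds, hx])]
      have hstep : aStep (m, (ds.length : Int), code) c
          = (m.insert c (ds.length : Int), (ds.length : Int) + 1,
             code ++ [(ds.length : Int)]) := by
        simp [aStep, hcon]
      have hlen : ((ds.length : Int) + 1) = (((ds ++ [c]).length : Nat) : Int) := by
        simp
      rw [List.foldl_cons, hstep, hlen, ih (ds ++ [c]) _ _ hnd' hm']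
      have hcmem : c ∈ ds ++ [c] := by simp
      have hidx : PySem.List.index? (PySem.Set.update (ds ++ [c]) l) c
          = some ds.length := by
        rw [PySem.Set.update_eq_append_filter, PySem.List.index?_append_of_mem _ hcmem,
            PySem.List.index?_append_singleton_self ds c hc]
      simp only [List.map_cons, hidx, Option.getD_some, List.append_assoc,
        List.singleton_append]

-- ===== VERDICT (by name: the statement is the Claim_ definition above) =====
theorem findWordCode_spec : Claim_equal_findWordCode := by
  intro word _
  unfold Spec_findWordCode
  show findWordCode word = findWordCode_alt word
  have hB : (word.toList.foldl bStep (PySem.Set.empty, [])).2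
      = PySem.Set.update [] word.toList := by
    rw [show (PySem.Set.empty, ([] : List Char))
          = (([] : List Char), ([] : List Char)) from rfl,
        bfold_eq word.toList ([] : List Char)]
  have hA := afold_eq word.toList [] [] PySem.Dict.empty (by simp)
    (by
      intro c
      rw [PySem.Dict.get?_empty,
          (PySem.List.index?_eq_none_iff (xs := ([] : List Char)) (v := c)).2 (by simp)]
      rfl)
  simp only [findWordCode, findWordCode_alt, hB]
  simpa using hA
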